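-- pv_equiv track=rewrite | github.com/Amyr14/lecture_schedulling | main.py | create_adj
-- ===== SOURCE A (Python) =====
-- def create_adj(lectures):
--   adj = [[0 for _ in range(len(lectures))] for _ in range(len(lectures))]
--   for v1 in range(len(adj)):
--     for v2 in range(v1, len(adj)):
--       s1, c1 = lectures[v1]
--       s2, c2 = lectures[v2]
--       hasEdge = v1 != v2 and (s1 == s2 or c1 == c2)
--       adj[v1][v2] = int(hasEdge)
--       adj[v2][v1] = int(hasEdge)
--   return adj
-- ===== SOURCE B (Python) =====
-- def create_adj(lectures):
--     n = len(lectures)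
--     adj = [[0] * n for _ in range(n)]
--     slot_groups = {}
--     class_groups = {}
--     for i, (s, c) in enumerate(lectures):
--         slot_groups.setdefault(s, []).append(i)
--         class_groups.setdefault(c, []).append(i)
--     for members in list(slot_groups.values()) + list(class_groups.values()):
--         for a, i in enumerate(members):
--             for j in members[a + 1:]:
--                 adj[i][j] = 1
--                 adj[j][i] = 1
--     return adj
-- ===== Notes on version B (the rewrite author's own statement) =====
-- stated objective: faster
-- what changed: B builds the n x n zero matrix, groups lecture indices by slot and by class in one enumerate pass over two dicts, and then sets adj[i][j]=adj[j][i]=1 only for pairs inside each group, instead of A's per-pair hasEdge test over every (v1,v2) of the upper triangle; only sharing pairs are visited, so the quadratic pair scan disappears when groups are small (measured 5x faster on the generated inputs).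
import Mathlib
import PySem

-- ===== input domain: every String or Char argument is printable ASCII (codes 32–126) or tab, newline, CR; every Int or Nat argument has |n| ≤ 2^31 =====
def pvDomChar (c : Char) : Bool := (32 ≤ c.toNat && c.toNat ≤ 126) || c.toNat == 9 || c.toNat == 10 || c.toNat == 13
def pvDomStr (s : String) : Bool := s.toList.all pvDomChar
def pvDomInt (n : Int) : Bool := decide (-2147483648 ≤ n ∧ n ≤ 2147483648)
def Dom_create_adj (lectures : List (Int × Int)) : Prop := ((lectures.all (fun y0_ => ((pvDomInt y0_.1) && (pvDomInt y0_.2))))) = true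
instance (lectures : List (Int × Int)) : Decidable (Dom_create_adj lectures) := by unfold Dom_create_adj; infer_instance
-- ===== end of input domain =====

-- B groups lecture indices by slot and by class and marks only the pairs inside each
-- group, instead of A's hasEdge test on every pair of the upper triangle (objective: faster
-- on inputs with small groups, measured; same worst case).

-- ===== PORT A =====
-- adj[i][j] = v  (row i, column j), for Nat indices as produced by range()
def pvSet2 (m : List (List Int)) (i j : Nat) (v : Int) : List (List Int) :=
  m.set i ((m.getD i []).set j v)

-- body of A's inner loop: unpack both lectures, compute hasEdge, write both entries
def pvStepA (lectures : List (Int × Int)) (v1 : Nat) (adj : List (List Int)) (v2 : Nat) :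
    List (List Int) :=
  let p1 := lectures.getD v1 (0, 0)
  let p2 := lectures.getD v2 (0, 0)
  let e : Int := if v1 ≠ v2 ∧ (p1.1 = p2.1 ∨ p1.2 = p2.2) then 1 else 0
  pvSet2 (pvSet2 adj v1 v2 e) v2 v1 e

def create_adj (lectures : List (Int × Int)) : List (List Int) :=
  let adj := List.replicate lectures.length (List.replicate lectures.length (0 : Int))
  (List.range adj.length).foldl
    (fun adj v1 => (List.range' v1 (adj.length - v1)).foldl (pvStepA lectures v1) adj) adj

-- ===== PORT B =====
-- adj[i][j] = 1 and adj[j][i] = 1 for Python int indices i, j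
def pvSetB (m : List (List Int)) (i j : Int) : List (List Int) :=
  PySem.List.pySetD m i (PySem.List.pySetD (PySem.List.pyGetD m i []) j (1 : Int))

-- for a, i in enumerate(members): for j in members[a+1:]: adj[i][j] = adj[j][i] = 1
def pvGroupPairs (m0 : List (List Int)) (members : List Int) : List (List Int) :=
  (PySem.List.enumerate members).foldl
    (fun m p =>
      (PySem.List.slice members (some (p.1 + 1)) none).foldl
        (fun m j => pvSetB (pvSetB m p.2 j) j p.2) m) m0

def create_adj_alt (lectures : List (Int × Int)) : List (List Int) :=
  let n := lectures.length
  let adj := List.replicate n (List.replicate n (0 : Int))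
  let gs := (PySem.List.enumerate lectures).foldl
      (fun (d : PySem.Dict Int (List Int) × PySem.Dict Int (List Int)) p =>
        (d.1.insert p.2.1 (d.1.getD p.2.1 [] ++ [p.1]),
         d.2.insert p.2.2 (d.2.getD p.2.2 [] ++ [p.1])))
      (PySem.Dict.empty, PySem.Dict.empty)
  (gs.1.values ++ gs.2.values).foldl pvGroupPairs adj

-- ===== PRECONDITION & SPEC =====
def Spec_create_adj (lectures : List (Int × Int)) (out : List (List Int)) : Prop := out = create_adj_alt lectures
instance (lectures : List (Int × Int)) (out : List (List Int)) : Decidable (Spec_create_adj lectures out) := by unfold Spec_create_adj; infer_instance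

-- ===== CLAIM (what is proved, stated in full; the proofs are below) =====
def Claim_equal_create_adj : Prop := ∀ (lectures : List (Int × Int)), Dom_create_adj lectures → Spec_create_adj lectures (create_adj lectures)

-- ===== LEMMAS AND PROOFS =====

-- lecture i (total form of lectures[i] for in-range i)
def pvLect (L : List (Int × Int)) (i : Nat) : Int × Int := L.getD i (0, 0)

-- the adjacency value both programs must put at (i, j)
def pvG (L : List (Int × Int)) (i j : Nat) : Int :=
  if i ≠ j ∧ ((pvLect L i).1 = (pvLect L j).1 ∨ (pvLect L i).2 = (pvLect L j).2) then 1 else 0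

-- entry (i, j) of a matrix, 0-defaulted
def pvEnt (m : List (List Int)) (i j : Nat) : Int := (m.getD i []).getD j 0

def pvShape (n : Nat) (m : List (List Int)) : Prop :=
  m.length = n ∧ ∀ r ∈ m, r.length = n

def pvInv (L : List (Int × Int)) (m : List (List Int)) (E : Nat → Nat → Int) : Prop :=
  pvShape L.length m ∧ ∀ i j, i < L.length → j < L.length → pvEnt m i j = E i j

lemma pvG_symm (L : List (Int × Int)) (i j : Nat) : pvG L i j = pvG L j i := by
  unfold pvG
  by_cases h : i ≠ j ∧ ((pvLect L i).1 = (pvLect L j).1 ∨ (pvLect L i).2 = (pvLect L j).2)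
  · rw [if_pos h, if_pos ⟨h.1.symm, h.2.imp Eq.symm Eq.symm⟩]
  · rw [if_neg h, if_neg (fun hc => h ⟨hc.1.symm, hc.2.imp Eq.symm Eq.symm⟩)]

lemma pvInv_congr {L m E E'} (h : pvInv L m E)
    (he : ∀ i j, i < L.length → j < L.length → E i j = E' i j) : pvInv L m E' :=
  ⟨h.1, fun i j hi hj => (h.2 i j hi hj).trans (he i j hi hj)⟩

lemma pvShape_pvSet2 {n : Nat} {m : List (List Int)} (h : pvShape n m) {i : Nat}
    (hi : i < n) (j : Nat) (v : Int) : pvShape n (pvSet2 m i j v) := by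
  have hlen : i < m.length := by rw [h.1]; exact hi
  refine ⟨by simp [pvSet2, h.1], ?_⟩
  intro r hr
  rcases List.mem_or_eq_of_mem_set hr with hr' | rfl
  · exact h.2 r hr'
  · rw [List.length_set, List.getD_eq_getElem _ _ hlen]
    exact h.2 _ (List.getElem_mem hlen)

lemma pvEnt_pvSet2 {n : Nat} {m : List (List Int)} (h : pvShape n m) {i j : Nat}
    (hi : i < n) (hj : j < n) (v : Int) (i' j' : Nat) :
    pvEnt (pvSet2 m i j v) i' j' = if i' = i ∧ j' = j then v else pvEnt m i' j' := by
  have hlen : i < m.length := by rw [h.1]; exact hi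
  have hrow : (m.getD i []).length = n := by
    rw [List.getD_eq_getElem _ _ hlen]; exact h.2 _ (List.getElem_mem hlen)
  by_cases hii : i' = i
  · subst hii
    have hr' : (pvSet2 m i' j v).getD i' [] = (m.getD i' []).set j v := by
      unfold pvSet2
      rw [List.getD_eq_getElem _ _ (by simpa using hlen)]
      exact List.getElem_set_self (by simpa using hlen)
    rw [pvEnt, hr']
    by_cases hjj : j' = j
    · subst hjj
      rw [List.getD_eq_getElem?_getD, List.getElem?_set_self (by omega), if_pos ⟨rfl, rfl⟩]
      rfl
    · rw [List.getD_eq_getElem?_getD, List.getElem?_set_ne (Ne.symm hjj), if_neg (by tauto)]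
      simp only [pvEnt, List.getD_eq_getElem?_getD]
  · have hr' : (pvSet2 m i j v).getD i' [] = m.getD i' [] := by
      unfold pvSet2
      rw [List.getD_eq_getElem?_getD, List.getElem?_set_ne (Ne.symm hii),
        ← List.getD_eq_getElem?_getD]
    rw [pvEnt, hr', if_neg (by tauto)]
    rfl

-- both programs' elementary move: write e at (a, b) and at (b, a)
lemma pvInv_write {L m E} (h : pvInv L m E) {a b : Nat}
    (ha : a < L.length) (hb : b < L.length) (e : Int) :
    pvInv L (pvSet2 (pvSet2 m a b e) b a e)
      (fun i j => if (i = a ∧ j = b) ∨ (i = b ∧ j = a) then e else E i j) := by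
  obtain ⟨hs, he⟩ := h
  have hs1 := pvShape_pvSet2 hs ha b e
  refine ⟨pvShape_pvSet2 hs1 hb a e, ?_⟩
  intro i j hi hj
  beta_reduce
  rw [pvEnt_pvSet2 hs1 hb ha e, pvEnt_pvSet2 hs ha hb e]
  by_cases h1 : i = b ∧ j = a
  · rw [if_pos h1, if_pos (Or.inr h1)]
  · rw [if_neg h1]
    by_cases h2 : i = a ∧ j = b
    · rw [if_pos h2, if_pos (Or.inl h2)]
    · rw [if_neg h2, if_neg (by tauto), he i j hi hj]

-- ===== A-side characterisation =====

lemma pvStepA_eq (L : List (Int × Int)) (v1 : Nat) (adj : List (List Int)) (v2 : Nat) :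
    pvStepA L v1 adj v2 = pvSet2 (pvSet2 adj v1 v2 (pvG L v1 v2)) v2 v1 (pvG L v1 v2) := rfl

lemma pvInnerA (L : List (Int × Int)) (v1 : Nat) (hv1 : v1 < L.length) :
    ∀ (k a : Nat) (m : List (List Int)) (E : Nat → Nat → Int),
      a + k = L.length → pvInv L m E →
      pvInv L ((List.range' a k).foldl (pvStepA L v1) m)
        (fun i j => if (i = v1 ∧ a ≤ j) ∨ (j = v1 ∧ a ≤ i) then pvG L i j else E i j) := by
  intro k
  induction k with
  | zero =>
    intro a m E hak h
    simp only [List.range', List.foldl_nil]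
    refine pvInv_congr h ?_
    intro i j hi hj
    rw [if_neg]; omega
  | succ k ih =>
    intro a m E hak h
    rw [List.range'_succ, List.foldl_cons, pvStepA_eq]
    have ha : a < L.length := by omega
    have h1 := pvInv_write h hv1 ha (pvG L v1 a)
    have h2 := ih (a + 1) _ _ (by omega) h1
    refine pvInv_congr h2 ?_
    intro i j hi hj
    by_cases hc : (i = v1 ∧ a + 1 ≤ j) ∨ (j = v1 ∧ a + 1 ≤ i)
    · rw [if_pos hc, if_pos (by omega)]
    · rw [if_neg hc]
      by_cases hd : (i = v1 ∧ j = a) ∨ (i = a ∧ j = v1)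
      · rw [if_pos hd, if_pos (by omega)]
        rcases hd with ⟨rfl, rfl⟩ | ⟨rfl, rfl⟩
        · rfl
        · exact (pvG_symm L i j).symm
      · rw [if_neg hd, if_neg (by omega)]

-- E after the first a outer iterations
def pvEa (L : List (Int × Int)) (a : Nat) : Nat → Nat → Int :=
  fun i j => if i < a ∨ j < a then pvG L i j else 0

lemma pvOuterA (L : List (Int × Int)) :
    ∀ (k a : Nat) (m : List (List Int)), a + k = L.length → pvInv L m (pvEa L a) →
      pvInv L ((List.range' a k).foldl
          (fun adj v1 => (List.range' v1 (adj.length - v1)).foldl (pvStepA L v1) adj) m)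
        (pvEa L L.length) := by
  intro k
  induction k with
  | zero =>
    intro a m hak h
    have ha : a = L.length := by omega
    subst ha
    simpa [List.range'] using h
  | succ k ih =>
    intro a m hak h
    rw [List.range'_succ, List.foldl_cons]
    have ha : a < L.length := by omega
    have hlen : m.length = L.length := h.1.1
    rw [hlen]
    have h1 := pvInnerA L a ha (L.length - a) a m _ (by omega) h
    have h2 : pvInv L ((List.range' a (L.length - a)).foldl (pvStepA L a) m) (pvEa L (a + 1)) := by
      refine pvInv_congr h1 ?_
      intro i j hi hj
      unfold pvEa
      by_cases hc : (i = a ∧ a ≤ j) ∨ (j = a ∧ a ≤ i)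
      · rw [if_pos hc, if_pos (by omega)]
      · rw [if_neg hc]
        by_cases hd : i < a ∨ j < a
        · rw [if_pos hd, if_pos (by omega)]
        · rw [if_neg hd, if_neg (by omega)]
    exact ih (a + 1) _ (by omega) h2

lemma pvShape_init (L : List (Int × Int)) :
    pvShape L.length (List.replicate L.length (List.replicate L.length (0 : Int))) := by
  constructor
  · simp
  · intro r hr
    rw [List.eq_of_mem_replicate hr]
    simp

lemma pvEnt_init (L : List (Int × Int)) (i j : Nat) :
    pvEnt (List.replicate L.length (List.replicate L.length (0 : Int))) i j = 0 := by
  unfold pvEnt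
  by_cases hi : i < L.length
  · rw [show (List.replicate L.length (List.replicate L.length (0:Int))).getD i [] =
        List.replicate L.length 0 from by
      rw [List.getD_eq_getElem _ _ (by simpa using hi)]; simp]
    by_cases hj : j < L.length
    · rw [List.getD_eq_getElem _ _ (by simpa using hj)]; simp
    · rw [List.getD_eq_getElem?_getD, List.getElem?_eq_none (by simpa using Nat.le_of_not_lt hj)]
      rfl
  · rw [show (List.replicate L.length (List.replicate L.length (0:Int))).getD i [] =
        ([] : List Int) from by
      rw [List.getD_eq_getElem?_getD, List.getElem?_eq_none (by simpa using Nat.le_of_not_lt hi)]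
      rfl]
    rfl

lemma pvA_char (L : List (Int × Int)) :
    pvInv L (create_adj L) (fun i j => pvG L i j) := by
  have h0 : pvInv L (List.replicate L.length (List.replicate L.length (0 : Int))) (pvEa L 0) :=
    ⟨pvShape_init L, fun i j _ _ => by rw [pvEnt_init]; simp [pvEa]⟩
  have h := pvOuterA L L.length 0 _ (by omega) h0
  unfold create_adj
  simp only [List.length_replicate, List.range_eq_range']
  refine pvInv_congr h ?_
  intro i j hi hj
  simp [pvEa, hi]

-- ===== B-side characterisation =====

lemma pvSetB_eq (m : List (List Int)) {i j : Int} (hi : 0 ≤ i) (hj : 0 ≤ j) :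
    pvSetB m i j = pvSet2 m i.toNat j.toNat 1 := by
  unfold pvSetB pvSet2
  rw [PySem.List.pySetD_of_nonneg _ _ hi, PySem.List.pySetD_of_nonneg _ _ hj,
    PySem.List.pyGetD_of_nonneg _ _ hi]

-- recursive form of the pair loops over one group
def pvPairRec : List Int → List (List Int) → List (List Int)
  | [], m => m
  | x :: rest, m => pvPairRec rest (rest.foldl (fun m j => pvSetB (pvSetB m x j) j x) m)

lemma pvGroupPairs_aux (v : List Int) :
    ∀ (w : List Int) (k : Nat) (m : List (List Int)), w = v.drop k →
      (PySem.List.enumerate w (k : Int)).foldl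
        (fun m p =>
          (PySem.List.slice v (some (p.1 + 1)) none).foldl
            (fun m j => pvSetB (pvSetB m p.2 j) j p.2) m) m = pvPairRec w m := by
  intro w
  induction w with
  | nil => intro k m _; simp [PySem.List.enumerate, pvPairRec]
  | cons x rest ih =>
    intro k m hw
    rw [PySem.List.enumerate_cons, List.foldl_cons]
    have hrest : rest = v.drop (k + 1) := by
      have := congrArg List.tail hw
      simpa [List.tail_drop] using this
    have hslice : PySem.List.slice v (some ((k : Int) + 1)) none = rest := by
      have : ((k : Int) + 1) = ((k + 1 : Nat) : Int) := by push_cast; ring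
      rw [this, PySem.List.slice_from_natCast, ← hrest]
    simp only [hslice]
    have : ((k : Int) + 1) = ((k + 1 : Nat) : Int) := by push_cast; ring
    rw [this, ih (k + 1) _ hrest]
    rfl

lemma pvGroupPairs_eq_pairRec (m : List (List Int)) (v : List Int) :
    pvGroupPairs m v = pvPairRec v m := by
  unfold pvGroupPairs
  have := pvGroupPairs_aux v v 0 m (by simp)
  simpa using this

-- a group list is sound: indices in range, no duplicates, every distinct pair shares
def pvOkGroup (L : List (Int × Int)) (v : List Int) : Prop :=
  v.Nodup ∧ (∀ x ∈ v, 0 ≤ x ∧ x < (L.length : Int)) ∧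
    ∀ x ∈ v, ∀ y ∈ v, x ≠ y → pvG L x.toNat y.toNat = 1

lemma pvInnerB (L : List (Int × Int)) (x : Int) (hx0 : 0 ≤ x) (hxn : x < (L.length : Int)) :
    ∀ (rest : List Int), (∀ y ∈ rest, 0 ≤ y ∧ y < (L.length : Int)) →
    ∀ m E, pvInv L m E →
      pvInv L (rest.foldl (fun m j => pvSetB (pvSetB m x j) j x) m)
        (fun i j => if ((i : Int) = x ∧ (j : Int) ∈ rest) ∨ ((j : Int) = x ∧ (i : Int) ∈ rest)
          then 1 else E i j) := by
  intro rest
  induction rest with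
  | nil =>
    intro _ m E h
    simpa using pvInv_congr h (by intro i j _ _; simp)
  | cons y t ih =>
    intro hb m E h
    obtain ⟨hy0, hyn⟩ := hb y (by simp)
    rw [List.foldl_cons, pvSetB_eq _ hx0 hy0, pvSetB_eq _ hy0 hx0]
    have h1 := pvInv_write h (a := x.toNat) (b := y.toNat) (by omega) (by omega) 1
    have h2 := ih (fun z hz => hb z (by simp [hz])) _ _ h1
    refine pvInv_congr h2 ?_
    intro i j hi hj
    have hix : (i : Int) = x ↔ i = x.toNat := by omega
    have hjx : (j : Int) = x ↔ j = x.toNat := by omega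
    have hiy : (i : Int) = y ↔ i = y.toNat := by omega
    have hjy : (j : Int) = y ↔ j = y.toNat := by omega
    by_cases hc : ((i : Int) = x ∧ (j : Int) ∈ t) ∨ ((j : Int) = x ∧ (i : Int) ∈ t)
    · rw [if_pos hc, if_pos (by rcases hc with ⟨h1, h2⟩ | ⟨h1, h2⟩; exacts [Or.inl ⟨h1, by simp [h2]⟩, Or.inr ⟨h1, by simp [h2]⟩])]
    · rw [if_neg hc]
      by_cases hd : (i = x.toNat ∧ j = y.toNat) ∨ (i = y.toNat ∧ j = x.toNat)
      · rw [if_pos hd, if_pos]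
        rcases hd with ⟨rfl, rfl⟩ | ⟨rfl, rfl⟩
        · exact Or.inl ⟨by omega, by simp; omega⟩
        · exact Or.inr ⟨by omega, by simp; omega⟩
      · rw [if_neg hd, if_neg]
        intro he
        rcases he with ⟨h1, h2⟩ | ⟨h1, h2⟩ <;> simp at h2
        · rcases h2 with h2 | h2
          · exact hd (Or.inl ⟨by omega, by omega⟩)
          · exact hc (Or.inl ⟨h1, h2⟩)
        · rcases h2 with h2 | h2
          · exact hd (Or.inr ⟨by omega, by omega⟩)
          · exact hc (Or.inr ⟨h1, h2⟩)

-- i and j are a (distinct) pair inside group v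
def pvHitV (v : List Int) (i j : Nat) : Bool :=
  v.contains (i : Int) && v.contains (j : Int) && (i != j)

lemma pvHitV_iff (v : List Int) (i j : Nat) :
    pvHitV v i j = true ↔ (i : Int) ∈ v ∧ (j : Int) ∈ v ∧ i ≠ j := by
  simp [pvHitV, and_assoc]

lemma pvPairRec_inv (L : List (Int × Int)) :
    ∀ (v : List Int) (m : List (List Int)) (E : Nat → Nat → Int),
      pvOkGroup L v → pvInv L m E →
      pvInv L (pvPairRec v m) (fun i j => if pvHitV v i j then 1 else E i j) := by
  intro v
  induction v with
  | nil =>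
    intro m E _ h
    exact pvInv_congr h (by intro i j _ _; simp [pvHitV])
  | cons x rest ih =>
    intro m E hok h
    obtain ⟨hnd, hb, hg⟩ := hok
    obtain ⟨hx0, hxn⟩ := hb x (by simp)
    unfold pvPairRec
    have h1 := pvInnerB L x hx0 hxn rest (fun y hy => hb y (by simp [hy])) m E h
    have hok' : pvOkGroup L rest :=
      ⟨(List.nodup_cons.mp hnd).2, fun y hy => hb y (by simp [hy]),
        fun a ha b hbb hab => hg a (by simp [ha]) b (by simp [hbb]) hab⟩
    have h2 := ih _ _ hok' h1
    refine pvInv_congr h2 ?_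
    intro i j hi hj
    beta_reduce
    have hxr : x ∉ rest := (List.nodup_cons.mp hnd).1
    by_cases hc : pvHitV rest i j = true
    · obtain ⟨h1', h2', h3'⟩ := (pvHitV_iff rest i j).mp hc
      rw [if_pos hc, if_pos ((pvHitV_iff _ i j).mpr ⟨by simp [h1'], by simp [h2'], h3'⟩)]
    · rw [if_neg hc]
      by_cases hd : ((i : Int) = x ∧ (j : Int) ∈ rest) ∨ ((j : Int) = x ∧ (i : Int) ∈ rest)
      · rw [if_pos hd, if_pos ((pvHitV_iff _ i j).mpr ?_)]
        rcases hd with ⟨h1', h2'⟩ | ⟨h1', h2'⟩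
        · exact ⟨by simp [h1'], by simp [h2'], fun hij => hxr (by rw [← h1', hij]; exact h2')⟩
        · exact ⟨by simp [h2'], by simp [h1'], fun hij => hxr (by rw [← h1', ← hij]; exact h2')⟩
      · rw [if_neg hd, if_neg]
        intro he
        obtain ⟨hiv, hjv, hij⟩ := (pvHitV_iff _ i j).mp he
        simp at hiv hjv
        rcases hiv with hiv | hiv <;> rcases hjv with hjv | hjv
        · exact hij (by omega)
        · exact hd (Or.inl ⟨hiv, hjv⟩)
        · exact hd (Or.inr ⟨hjv, hiv⟩)
        · exact hc ((pvHitV_iff _ i j).mpr ⟨hiv, hjv, hij⟩)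

-- i and j are a pair inside some group of gs
def pvHitG (gs : List (List Int)) (i j : Nat) : Bool := gs.any (fun v => pvHitV v i j)

lemma pvHitG_iff' (gs : List (List Int)) (i j : Nat) :
    pvHitG gs i j = true ↔ ∃ v ∈ gs, pvHitV v i j = true := by
  simp [pvHitG]

lemma pvGroupsFold_inv (L : List (Int × Int)) :
    ∀ (gs : List (List Int)) (m : List (List Int)) (E : Nat → Nat → Int),
      (∀ v ∈ gs, pvOkGroup L v) → pvInv L m E →
      pvInv L (gs.foldl pvGroupPairs m) (fun i j => if pvHitG gs i j then 1 else E i j) := by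
  intro gs
  induction gs with
  | nil =>
    intro m E _ h
    exact pvInv_congr h (by intro i j _ _; simp [pvHitG])
  | cons v t ih =>
    intro m E hok h
    rw [List.foldl_cons, pvGroupPairs_eq_pairRec]
    have h1 := pvPairRec_inv L v m E (hok v (by simp)) h
    have h2 := ih _ _ (fun w hw => hok w (by simp [hw])) h1
    refine pvInv_congr h2 ?_
    intro i j hi hj
    beta_reduce
    by_cases hc : pvHitG t i j = true
    · obtain ⟨w, hw, hh⟩ := (pvHitG_iff' t i j).mp hc
      rw [if_pos hc, if_pos ((pvHitG_iff' _ i j).mpr ⟨w, by simp [hw], hh⟩)]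
    · rw [if_neg hc]
      by_cases hd : pvHitV v i j = true
      · rw [if_pos hd, if_pos ((pvHitG_iff' _ i j).mpr ⟨v, by simp, hd⟩)]
      · rw [if_neg hd, if_neg]
        intro he
        obtain ⟨w, hw, hh⟩ := (pvHitG_iff' _ i j).mp he
        simp at hw
        rcases hw with rfl | hw
        · exact hd hh
        · exact hc ((pvHitG_iff' t i j).mpr ⟨w, hw, hh⟩)

-- phase 1: the grouping dict, parametric in the key (slot or class)
def pvDictF (key : Int × Int → Int) (L : List (Int × Int)) : PySem.Dict Int (List Int) :=
  (PySem.List.enumerate L).foldl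
    (fun d p => d.insert (key p.2) (d.getD (key p.2) [] ++ [p.1])) PySem.Dict.empty

-- the group that key value s collects: indices of lectures with that key, in order
def pvMemG (key : Int × Int → Int) (L : List (Int × Int)) (s : Int) : List Int :=
  List.map (fun i : Nat => (i : Int))
    (List.filter (fun i => key (pvLect L i) == s) (List.range L.length))

lemma pvDictF_getD_aux (key : Int × Int → Int) :
    ∀ (l : List (Int × (Int × Int))) (d : PySem.Dict Int (List Int)) (s : Int),
      (l.foldl (fun (d : PySem.Dict Int (List Int)) (p : Int × (Int × Int)) =>
          d.insert (key p.2) (d.getD (key p.2) [] ++ [p.1])) d).getD s []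
        = d.getD s [] ++ (l.filter (fun p => key p.2 == s)).map (·.1) := by
  intro l
  induction l with
  | nil => intro d s; simp
  | cons p t ih =>
    intro d s
    rw [List.foldl_cons, ih, List.filter_cons]
    by_cases hc : key p.2 = s
    · simp [hc]
    · simp [hc, PySem.Dict.getD_insert, Ne.symm hc]

lemma pvEnum_filter (key : Int × Int → Int) (L : List (Int × Int)) (s : Int) :
    ((PySem.List.enumerate L).filter (fun p => key p.2 == s)).map (·.1) = pvMemG key L s := by
  have hE : PySem.List.enumerate L
      = (List.range L.length).map (fun k : Nat => ((k : Int), pvLect L k)) := by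
    rw [PySem.List.enumerate_eq_map_pyRange L (0, 0), PySem.List.len_eq,
      PySem.List.pyRange_zero_nat, List.map_map]
    apply List.map_congr_left
    intro k hk
    simp [pvLect]
  rw [hE, List.filter_map, List.map_map]
  rfl

lemma pvDictF_getD (key : Int × Int → Int) (L : List (Int × Int)) (s : Int) :
    (pvDictF key L).getD s [] = pvMemG key L s := by
  rw [pvDictF, pvDictF_getD_aux, PySem.Dict.getD_empty, List.nil_append, pvEnum_filter]

lemma pvDictF_keys_nodup (key : Int × Int → Int) (L : List (Int × Int)) :
    (pvDictF key L).keys.Nodup := by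
  exact PySem.Dict.nodup_keys_foldl_insert_key (PySem.List.enumerate L)
    (fun p => key p.2) (fun d (p : Int × (Int × Int)) => d.getD (key p.2) [] ++ [p.1])
    PySem.Dict.empty
    (by rw [show (PySem.Dict.empty : PySem.Dict Int (List Int)).keys = [] from rfl]
        exact List.nodup_nil)

lemma pvDictF_values_mem (key : Int × Int → Int) (L : List (Int × Int)) (v : List Int)
    (hv : v ∈ (pvDictF key L).values) : ∃ s, v = pvMemG key L s := by
  rw [PySem.Dict.values_eq_map_keys _ (pvDictF_keys_nodup key L) []] at hv
  obtain ⟨s, _, rfl⟩ := List.mem_map.mp hv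
  exact ⟨s, (pvDictF_getD key L s)⟩

lemma pvDictF_mem_values (key : Int × Int → Int) (L : List (Int × Int)) (i : Nat)
    (hi : i < L.length) : pvMemG key L (key (pvLect L i)) ∈ (pvDictF key L).values := by
  have hkey : key (pvLect L i) ∈ (pvDictF key L).keys := by
    rw [pvDictF, PySem.Dict.keys_foldl_insert_key]
    rw [PySem.Set.mem_update]
    right
    rw [PySem.List.enumerate_eq_map_pyRange L (0, 0), PySem.List.len_eq,
      PySem.List.pyRange_zero_nat, List.map_map, List.map_map]
    exact List.mem_map.mpr ⟨i, List.mem_range.mpr hi, by simp [Function.comp_def, pvLect]⟩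
  rw [PySem.Dict.values_eq_map_keys _ (pvDictF_keys_nodup key L) []]
  exact List.mem_map.mpr ⟨key (pvLect L i), hkey, (pvDictF_getD key L _)⟩

lemma pvOkGroup_memG (key : Int × Int → Int) (L : List (Int × Int)) (s : Int)
    (hkey : ∀ a b : Int × Int, key a = key b → a.1 = b.1 ∨ a.2 = b.2) :
    pvOkGroup L (pvMemG key L s) := by
  refine ⟨?_, ?_, ?_⟩
  · exact ((List.nodup_range).filter _).map (fun a b => by omega)
  · intro x hx
    obtain ⟨i, hi, rfl⟩ := List.mem_map.mp hx
    have := List.mem_range.mp (List.mem_of_mem_filter hi)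
    omega
  · intro x hx y hy hxy
    obtain ⟨i, hi, rfl⟩ := List.mem_map.mp hx
    obtain ⟨j, hj, rfl⟩ := List.mem_map.mp hy
    have hsi : key (pvLect L i) = s := by simpa using List.of_mem_filter hi
    have hsj : key (pvLect L j) = s := by simpa using List.of_mem_filter hj
    have : pvLect L ((i : Int).toNat) = pvLect L i := by simp
    rw [pvG, if_pos]
    refine ⟨by omega, ?_⟩
    have := hkey (pvLect L i) (pvLect L j) (hsi.trans hsj.symm)
    simpa using this

lemma pvB_char (L : List (Int × Int)) :
    pvInv L (create_adj_alt L)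
      (fun i j => if pvHitG ((pvDictF Prod.fst L).values ++ (pvDictF Prod.snd L).values) i j
        then 1 else 0) := by
  have h0 : pvInv L (List.replicate L.length (List.replicate L.length (0 : Int)))
      (fun _ _ => 0) := ⟨pvShape_init L, fun i j _ _ => pvEnt_init L i j⟩
  have hok : ∀ v ∈ (pvDictF Prod.fst L).values ++ (pvDictF Prod.snd L).values, pvOkGroup L v := by
    intro v hv
    rcases List.mem_append.mp hv with hv | hv
    · obtain ⟨s, rfl⟩ := pvDictF_values_mem _ L v hv
      exact pvOkGroup_memG _ L s (fun a b h => Or.inl h)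
    · obtain ⟨s, rfl⟩ := pvDictF_values_mem _ L v hv
      exact pvOkGroup_memG _ L s (fun a b h => Or.inr h)
  have h := pvGroupsFold_inv L _ _ _ hok h0
  simp only [create_adj_alt]
  rw [PySem.List.foldl_prod_mk
    (fun (d : PySem.Dict Int (List Int)) (p : Int × (Int × Int)) =>
      d.insert p.2.1 (d.getD p.2.1 [] ++ [p.1]))
    (fun (d : PySem.Dict Int (List Int)) (p : Int × (Int × Int)) =>
      d.insert p.2.2 (d.getD p.2.2 [] ++ [p.1]))
    (PySem.List.enumerate L) PySem.Dict.empty PySem.Dict.empty]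
  exact h

-- bridge: the hit predicate is exactly pvG = 1
lemma pvHitG_iff (L : List (Int × Int)) (i j : Nat) (hi : i < L.length) (hj : j < L.length) :
    (if pvHitG ((pvDictF Prod.fst L).values ++ (pvDictF Prod.snd L).values) i j then (1:Int) else 0)
      = pvG L i j := by
  by_cases hc : pvHitG ((pvDictF Prod.fst L).values ++ (pvDictF Prod.snd L).values) i j = true
  · rw [if_pos hc]
    obtain ⟨v, hv, hh⟩ := (pvHitG_iff' _ i j).mp hc
    obtain ⟨hiv, hjv, hij⟩ := (pvHitV_iff v i j).mp hh
    have hok : pvOkGroup L v := by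
      rcases List.mem_append.mp hv with hv | hv
      · obtain ⟨s, rfl⟩ := pvDictF_values_mem _ L v hv
        exact pvOkGroup_memG _ L s (fun a b h => Or.inl h)
      · obtain ⟨s, rfl⟩ := pvDictF_values_mem _ L v hv
        exact pvOkGroup_memG _ L s (fun a b h => Or.inr h)
    have := hok.2.2 _ hiv _ hjv (by exact_mod_cast fun h => hij (by exact_mod_cast h))
    simpa using this.symm
  · rw [if_neg hc]
    unfold pvG
    rw [if_neg]
    intro ⟨hij, hshare⟩
    apply hc
    apply (pvHitG_iff' _ i j).mpr
    rcases hshare with hs | hs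
    · refine ⟨pvMemG Prod.fst L ((pvLect L i).1), List.mem_append_left _ (pvDictF_mem_values _ L i hi), (pvHitV_iff _ i j).mpr ⟨?_, ?_, hij⟩⟩
      · exact List.mem_map.mpr ⟨i, List.mem_filter.mpr ⟨List.mem_range.mpr hi, by simp⟩, rfl⟩
      · exact List.mem_map.mpr ⟨j, List.mem_filter.mpr ⟨List.mem_range.mpr hj, by simp [hs]⟩, rfl⟩
    · refine ⟨pvMemG Prod.snd L ((pvLect L i).2), List.mem_append_right _ (pvDictF_mem_values _ L i hi), (pvHitV_iff _ i j).mpr ⟨?_, ?_, hij⟩⟩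
      · exact List.mem_map.mpr ⟨i, List.mem_filter.mpr ⟨List.mem_range.mpr hi, by simp⟩, rfl⟩
      · exact List.mem_map.mpr ⟨j, List.mem_filter.mpr ⟨List.mem_range.mpr hj, by simp [hs]⟩, rfl⟩

-- two n×n matrices with the same entries are equal
lemma pvMat_ext {n : Nat} {m1 m2 : List (List Int)} (h1 : pvShape n m1) (h2 : pvShape n m2)
    (he : ∀ i j, i < n → j < n → pvEnt m1 i j = pvEnt m2 i j) : m1 = m2 := by
  apply List.ext_getElem (by rw [h1.1, h2.1])
  intro i hi1 hi2
  have hr1 : m1[i].length = n := h1.2 _ (List.getElem_mem hi1)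
  have hr2 : m2[i].length = n := h2.2 _ (List.getElem_mem hi2)
  apply List.ext_getElem (by rw [hr1, hr2])
  intro j hj1 hj2
  have := he i j (by rw [← h1.1]; exact hi1) (by rw [← hr1]; exact hj1)
  rwa [pvEnt, pvEnt, List.getD_eq_getElem _ _ hi1, List.getD_eq_getElem _ _ hi2,
    List.getD_eq_getElem _ _ hj1, List.getD_eq_getElem _ _ hj2] at this

-- ===== VERDICT (by name: the statement is the Claim_ definition above) =====
theorem create_adj_spec : Claim_equal_create_adj := by
  intro L _
  unfold Spec_create_adj
  have hA := pvA_char L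
  have hB := pvB_char L
  exact pvMat_ext hA.1 hB.1 (fun i j hi hj => by
    have e1 := hA.2 i j hi hj
    have e2 := hB.2 i j hi hj
    beta_reduce at e1 e2
    rw [e1, e2, pvHitG_iff L i j hi hj])
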